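-- pv_equiv track=rewrite | github.com/walshification/Projects | lib/text.py | postpend_cons
-- ===== SOURCE A (Python) =====
-- def postpend_cons(word):
--     """Moves the first consonants of word to the end of the word."""
--     first_consonants = ''
--     for char in word:
--         if char not in 'aeiou':
--             first_consonants += char
--         else:
--             break
--     return word[len(first_consonants):] + first_consonants
-- ===== SOURCE B (Python) =====
-- def postpend_cons(word):
--     """Moves the first consonants of word to the end of the word."""
--     finds = [word.find(v) for v in 'aeiou']
--     kept = [i for i in finds if i != -1]
--     i = min(kept) if kept else len(word)
--     return word[i:] + word[:i]
-- ===== Notes on version B (the rewrite author's own statement) =====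
-- stated objective: alternative
-- what changed: Replaces A's accumulating character-by-character scan (building a consonant prefix string until the first vowel) with a min-of-finds decomposition: compute word.find(v) for each of the five vowels, drop the -1 misses, take the minimum (or len(word) if none) as the split index, and rotate with two slices.
import Mathlib
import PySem

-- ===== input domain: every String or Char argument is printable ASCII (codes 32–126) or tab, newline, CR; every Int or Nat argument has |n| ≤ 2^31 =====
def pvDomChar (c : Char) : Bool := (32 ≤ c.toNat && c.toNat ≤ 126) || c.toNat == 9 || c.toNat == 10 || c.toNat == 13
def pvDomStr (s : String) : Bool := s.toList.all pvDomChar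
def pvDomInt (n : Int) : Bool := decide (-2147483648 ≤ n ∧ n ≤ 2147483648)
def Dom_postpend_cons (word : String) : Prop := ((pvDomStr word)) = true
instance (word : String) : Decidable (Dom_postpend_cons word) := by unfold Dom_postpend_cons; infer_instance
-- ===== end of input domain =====

-- B replaces A's accumulating character-by-character scan with min-of-finds: the first-vowel
-- index is the minimum of the kept word.find(v) positions over 'aeiou' (len(word) if none);
-- objective: an alternative decomposition of the same rotation.

-- the vowel string 'aeiou' as a list of characters (shared data constant)
def vcs : List Char := ['a', 'e', 'i', 'o', 'u']

-- ===== PORT A =====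
-- A's loop: accumulate leading consonants into first_consonants, break at the first vowel
def pcLoop (cs : List Char) (fc : List Char) : List Char :=
  match cs with
  | [] => fc
  | c :: rest =>
    if PySem.Chars.isIn [c] vcs = false
    then pcLoop rest (fc ++ [c])
    else fc

def postpend_cons (word : String) : String :=
  let fc := pcLoop word.toList []
  String.ofList (PySem.Chars.slice word.toList (some (fc.length : Int)) none ++ fc)

-- ===== PORT B =====
def postpend_cons_alt (word : String) : String :=
  let cs := word.toList
  let finds := vcs.map (fun v => PySem.Chars.find cs [v])
  let kept := finds.filter (fun n => n != -1)
  let i : Int :=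
    match PySem.List.min? kept (fun x => x) with
    | some m => m
    | none => (cs.length : Int)
  String.ofList (PySem.Chars.slice cs (some i) none ++ PySem.Chars.slice cs none (some i))

-- ===== PRECONDITION & SPEC =====
def Spec_postpend_cons (word : String) (out : String) : Prop := out = postpend_cons_alt word
instance (word : String) (out : String) : Decidable (Spec_postpend_cons word out) := by unfold Spec_postpend_cons; infer_instance

-- ===== CLAIM (what is proved, stated in full; the proofs are below) =====
def Claim_equal_postpend_cons : Prop := ∀ (word : String), Dom_postpend_cons word → Spec_postpend_cons word (postpend_cons word)

-- ===== LEMMAS AND PROOFS =====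

-- the "not a vowel" predicate A's loop tests
def nvP (c : Char) : Bool := !PySem.Chars.isIn [c] vcs

theorem isIn_singleton_iff (c : Char) (l : List Char) :
    PySem.Chars.isIn [c] l = true ↔ c ∈ l := by
  rw [PySem.Chars.isIn_iff_infix, List.singleton_infix_iff]

theorem find_singleton_neg_one (cs : List Char) (v : Char) :
    PySem.Chars.find cs [v] = -1 ↔ v ∉ cs := by
  rw [PySem.Chars.find_eq_neg_one_iff, List.singleton_infix_iff]

theorem singleton_prefix_iff (v : Char) (t : List Char) : [v] <+: t ↔ t.head? = some v := by
  cases t with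
  | nil => simp
  | cons a u =>
    constructor
    · rintro ⟨w, hw⟩
      simp at hw
      simp [hw.1]
    · intro h
      simp at h
      exact ⟨u, by simp [h]⟩

-- find over a singleton pattern points at the first occurrence of that character
theorem find_singleton_spec (cs : List Char) (v : Char)
    (h : 0 ≤ PySem.Chars.find cs [v]) :
    cs[(PySem.Chars.find cs [v]).toNat]? = some v ∧
      ∀ j < (PySem.Chars.find cs [v]).toNat, cs[j]? ≠ some v := by
  obtain ⟨h1, h2⟩ := PySem.Chars.find_spec (s := cs) (sub := [v]) h
  rw [singleton_prefix_iff, List.head?_drop] at h1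
  refine ⟨h1, fun j hj hcontra => ?_⟩
  exact h2 j hj ((singleton_prefix_iff v _).mpr (by rw [List.head?_drop]; exact hcontra))

theorem takeWhile_elem (p : Char → Bool) (l : List Char) (j : Nat)
    (hj : j < (l.takeWhile p).length) (hl : j < l.length) : p l[j] = true := by
  have h1 : (l.takeWhile p)[j] = l[j] := (List.takeWhile_prefix p).getElem hj
  rw [← h1]
  exact List.mem_takeWhile_imp (List.getElem_mem hj)

theorem takeWhile_boundary (p : Char → Bool) (l : List Char)
    (h : (l.takeWhile p).length < l.length) : p (l[(l.takeWhile p).length]'h) = false := by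
  induction l with
  | nil => simp at h
  | cons c t ih =>
    by_cases hc : p c = true
    · simp [hc] at h ⊢
      exact ih h
    · simp at hc
      simp [hc]

-- A's loop collects exactly the maximal non-vowel prefix
theorem pcLoop_eq_takeWhile (cs acc : List Char) :
    pcLoop cs acc = acc ++ cs.takeWhile nvP := by
  induction cs generalizing acc with
  | nil => simp [pcLoop]
  | cons c rest ih =>
    by_cases h : PySem.Chars.isIn [c] vcs = false
    · simp [pcLoop, h, nvP, ih]
    · simp at h
      simp [pcLoop, h, nvP]

-- B's min-of-finds index equals the length of the maximal non-vowel prefix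
theorem index_eq (cs : List Char) :
    (match PySem.List.min? ((vcs.map (fun v => PySem.Chars.find cs [v])).filter (fun n => n != -1)) (fun x => x) with
     | some m => m
     | none => (cs.length : Int))
    = ((cs.takeWhile nvP).length : Int) := by
  set finds := vcs.map (fun v => PySem.Chars.find cs [v]) with hfinds
  set kept := finds.filter (fun n => n != -1) with hkept
  set k := (cs.takeWhile nvP).length with hk
  have hkle : k ≤ cs.length := by
    rw [hk]; exact (List.takeWhile_prefix nvP).length_le
  cases hmin : PySem.List.min? kept (fun x => x) with
  | none =>
    have hnil : kept = [] := (PySem.List.min?_eq_none_iff _ _).mp hmin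
    have hnov : ∀ v ∈ vcs, v ∉ cs := by
      intro v hv
      have hmem : PySem.Chars.find cs [v] ∈ finds := List.mem_map_of_mem hv
      have h1 : ¬(PySem.Chars.find cs [v] != -1) = true := by
        intro hne
        have : PySem.Chars.find cs [v] ∈ kept := List.mem_filter.mpr ⟨hmem, hne⟩
        rw [hnil] at this; simp at this
      simp at h1
      exact (find_singleton_neg_one cs v).mp h1
    have hall : cs.takeWhile nvP = cs := by
      apply List.takeWhile_eq_self_iff.mpr
      intro c hc
      simp only [nvP, Bool.not_eq_true']
      rw [Bool.eq_false_iff]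
      intro hin
      exact absurd hc (hnov c ((isIn_singleton_iff c vcs).mp hin))
    simp [hk, hall]
  | some m =>
    have hmem : m ∈ kept := PySem.List.min?_mem hmin
    obtain ⟨hmf, hmne⟩ := List.mem_filter.mp hmem
    obtain ⟨v, hv, hveq⟩ := List.mem_map.mp hmf
    show m = (k : Int)
    have hneg1 : (-1 : Int) ≤ PySem.Chars.find cs [v] := PySem.Chars.neg_one_le_find cs [v]
    have hmne' : m ≠ -1 := by simpa using hmne
    have hm0 : 0 ≤ m := by omega
    obtain ⟨hat, hfirst⟩ := find_singleton_spec cs v (hveq ▸ hm0)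
    rw [hveq] at hat hfirst
    have hmlen : m.toNat < cs.length := by
      by_contra hge
      rw [List.getElem?_eq_none (by omega)] at hat
      simp at hat
    have hkm : k ≤ m.toNat := by
      by_contra hlt
      push_neg at hlt
      have := takeWhile_elem nvP cs m.toNat hlt hmlen
      rw [List.getElem?_eq_getElem hmlen] at hat
      simp at hat
      rw [hat] at this
      simp [nvP] at this
      exact absurd ((isIn_singleton_iff v vcs).mpr hv) (by simp [this])
    have hklt : k < cs.length := by omega
    have hbd := takeWhile_boundary nvP cs (hk ▸ hklt)
    set v0 := cs[k] with hv0
    have hv0v : v0 ∈ vcs := by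
      simp [nvP] at hbd
      exact (isIn_singleton_iff v0 vcs).mp (by simpa using hbd)
    have hv0cs : v0 ∈ cs := List.getElem_mem hklt
    have hfv0ne : PySem.Chars.find cs [v0] ≠ -1 := by
      rw [Ne, find_singleton_neg_one]; simp [hv0cs]
    have hfv00 : 0 ≤ PySem.Chars.find cs [v0] := by
      have : (-1 : Int) ≤ PySem.Chars.find cs [v0] := PySem.Chars.neg_one_le_find cs [v0]
      omega
    have hfv0kept : PySem.Chars.find cs [v0] ∈ kept := by
      refine List.mem_filter.mpr ⟨List.mem_map_of_mem hv0v, by simpa using hfv0ne⟩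
    have hmle : m ≤ PySem.Chars.find cs [v0] := PySem.List.min?_isMin hmin _ hfv0kept
    obtain ⟨_, hfirst0⟩ := find_singleton_spec cs v0 hfv00
    have hfv0k : (PySem.Chars.find cs [v0]).toNat ≤ k := by
      by_contra hgt
      push_neg at hgt
      exact hfirst0 k hgt (by rw [List.getElem?_eq_getElem hklt])
    omega

theorem main_eq (word : String) : postpend_cons word = postpend_cons_alt word := by
  unfold postpend_cons postpend_cons_alt
  dsimp only
  rw [pcLoop_eq_takeWhile, index_eq word.toList]
  simp only [List.nil_append]
  set cs := word.toList
  set k := (cs.takeWhile nvP).length with hk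
  have ht : List.takeWhile nvP cs = cs.take k := by
    rw [hk]; exact List.prefix_iff_eq_take.mp (List.takeWhile_prefix nvP)
  simp only [PySem.Chars.slice_eq_listSlice,
    PySem.List.slice_from cs (Int.natCast_nonneg k), PySem.List.slice_to cs (Int.natCast_nonneg k),
    Int.toNat_natCast, ht]

-- ===== VERDICT (by name: the statement is the Claim_ definition above) =====
theorem postpend_cons_spec : Claim_equal_postpend_cons := by
  intro word _
  unfold Spec_postpend_cons
  exact main_eq word
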